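-- pv_equiv track=rewrite | github.com/tejoker/Unaite_summer_research | archive/test_scripts/create_test_anomalies.py | calculate_expected_window
-- ===== SOURCE A (Python) =====
-- def calculate_expected_window(row_location, window_size=100, stride=10):
--     """Calculate which window should first detect the anomaly"""
--     # After differencing, row N becomes row N-1
--     diff_row = row_location - 1
--
--     # Find first window containing this row
--     for w in range(0, 100):
--         w_start = w * stride
--         w_end = w_start + window_size - 1
--
--         if w_start <= diff_row <= w_end:
--             return w, w_start, w_end
--
--     return None, None, None
-- ===== SOURCE B (Python) =====
-- def calculate_expected_window(row_location, window_size=100, stride=10):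
--     """Closed form: the first window whose end can still cover the differenced row."""
--     diff_row = row_location - 1
--     w = max(0, -(-(diff_row - window_size + 1) // stride))
--     w_start = w * stride
--     w_end = w_start + window_size - 1
--     if w < 100 and w_start <= diff_row <= w_end:
--         return w, w_start, w_end
--     return None, None, None
-- ===== Notes on version B (the rewrite author's own statement) =====
-- stated objective: simpler
-- what changed: Replaces the scan over 100 candidate windows with a closed-form ceiling-division computation of the first candidate window index plus one containment check; Pre_ restricts to positive strides (the natural sliding-window domain): stride=0 makes B's division raise ZeroDivisionError, and a negative stride is a degenerate configuration where A's scan result is an accident of iteration order.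
-- outside the precondition, e.g. on calculate_expected_window(5, 50, 0): A returns (0, 0, 49), B raises ZeroDivisionError; on calculate_expected_window(21, 26, -14): A returns (0, 0, 25), B returns (None, None, None)
import Mathlib
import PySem

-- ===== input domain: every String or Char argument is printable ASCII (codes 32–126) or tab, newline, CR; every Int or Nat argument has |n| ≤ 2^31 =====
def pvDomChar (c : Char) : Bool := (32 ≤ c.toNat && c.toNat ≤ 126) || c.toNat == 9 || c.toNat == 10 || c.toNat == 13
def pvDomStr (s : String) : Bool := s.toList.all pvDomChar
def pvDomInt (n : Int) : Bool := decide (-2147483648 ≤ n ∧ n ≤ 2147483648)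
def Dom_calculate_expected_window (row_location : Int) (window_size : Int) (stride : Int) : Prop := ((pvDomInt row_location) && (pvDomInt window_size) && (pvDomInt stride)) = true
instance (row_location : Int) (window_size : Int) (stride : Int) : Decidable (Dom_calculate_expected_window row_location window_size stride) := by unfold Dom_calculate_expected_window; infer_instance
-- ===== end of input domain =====

-- B replaces A's linear scan over the 100 candidate windows by a closed-form ceiling-division
-- computation of the first matching window index (objective: simpler), for positive strides.

-- ===== PORT A =====
-- the for-loop with early return, over range(0, 100)
def pvGoA (diff_row window_size stride : Int) : List Int → Option Int × Option Int × Option Int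
  | [] => (none, none, none)
  | w :: rest =>
    let w_start := w * stride
    let w_end := w_start + window_size - 1
    if w_start ≤ diff_row ∧ diff_row ≤ w_end then (some w, some w_start, some w_end)
    else pvGoA diff_row window_size stride rest

def calculate_expected_window (row_location : Int) (window_size : Int) (stride : Int) : Option Int × Option Int × Option Int :=
  let diff_row := row_location - 1
  pvGoA diff_row window_size stride (PySem.List.pyRange 0 100 1)

-- ===== PORT B =====
def calculate_expected_window_alt (row_location : Int) (window_size : Int) (stride : Int) : Option Int × Option Int × Option Int :=
  let diff_row := row_location - 1
  let w := max 0 (-(PySem.Int.floordiv (-(diff_row - window_size + 1)) stride))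
  let w_start := w * stride
  let w_end := w_start + window_size - 1
  if w < 100 ∧ w_start ≤ diff_row ∧ diff_row ≤ w_end then (some w, some w_start, some w_end)
  else (none, none, none)

-- ===== PRECONDITION & SPEC =====
-- Pre_ restricts to the natural sliding-window domain of positive strides: on stride = 0 B's
-- division raises ZeroDivisionError, and a negative stride is a degenerate configuration on
-- which A's scan result is an accident of iteration order.
def Pre_calculate_expected_window (row_location : Int) (window_size : Int) (stride : Int) : Prop := 0 < stride
instance (row_location : Int) (window_size : Int) (stride : Int) : Decidable (Pre_calculate_expected_window row_location window_size stride) := by unfold Pre_calculate_expected_window; infer_instance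
def pvWitness_calculate_expected_window : Int × Int × Int := (25, 100, 10)
def Spec_calculate_expected_window (row_location : Int) (window_size : Int) (stride : Int) (out : Option Int × Option Int × Option Int) : Prop := out = calculate_expected_window_alt row_location window_size stride
instance (row_location : Int) (window_size : Int) (stride : Int) (out : Option Int × Option Int × Option Int) : Decidable (Spec_calculate_expected_window row_location window_size stride out) := by unfold Spec_calculate_expected_window; infer_instance

-- ===== CLAIM (what is proved, stated in full; the proofs are below) =====
def Claim_equal_calculate_expected_window : Prop := ∀ (row_location : Int) (window_size : Int) (stride : Int), Dom_calculate_expected_window row_location window_size stride → Pre_calculate_expected_window row_location window_size stride → Spec_calculate_expected_window row_location window_size stride (calculate_expected_window row_location window_size stride)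

-- ===== LEMMAS AND PROOFS =====

-- the loop returns (none,none,none) when no element of the list matches
theorem pvGoA_none (diff ws s : Int) (L : List Int)
    (h : ∀ w ∈ L, ¬(w * s ≤ diff ∧ diff ≤ w * s + ws - 1)) :
    pvGoA diff ws s L = (none, none, none) := by
  induction L with
  | nil => rfl
  | cons w rest ih =>
    simp only [pvGoA]
    rw [if_neg (h w (List.mem_cons_self))]
    exact ih (fun x hx => h x (List.mem_cons_of_mem _ hx))

-- the loop returns the first matching element
theorem pvGoA_found (diff ws s : Int) (L1 L2 : List Int) (w : Int)
    (h1 : ∀ x ∈ L1, ¬(x * s ≤ diff ∧ diff ≤ x * s + ws - 1))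
    (hw : w * s ≤ diff ∧ diff ≤ w * s + ws - 1) :
    pvGoA diff ws s (L1 ++ w :: L2) = (some w, some (w * s), some (w * s + ws - 1)) := by
  induction L1 with
  | nil => simp only [List.nil_append, pvGoA]; rw [if_pos hw]
  | cons x rest ih =>
    simp only [List.cons_append, pvGoA]
    rw [if_neg (h1 x (List.mem_cons_self))]
    exact ih (fun y hy => h1 y (List.mem_cons_of_mem _ hy))

-- shared skeleton: with w0 the closed-form candidate, loop = formula
theorem pvMain (diff ws s w0 : Int) (hw0 : 0 ≤ w0)
    (hbelow : ∀ x, 0 ≤ x → x < w0 → ¬(x * s ≤ diff ∧ diff ≤ x * s + ws - 1))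
    (habove : ¬(w0 * s ≤ diff ∧ diff ≤ w0 * s + ws - 1) →
      ∀ x, w0 ≤ x → ¬(x * s ≤ diff ∧ diff ≤ x * s + ws - 1)) :
    pvGoA diff ws s (PySem.List.pyRange 0 100 1) =
      (if w0 < 100 ∧ w0 * s ≤ diff ∧ diff ≤ w0 * s + ws - 1
       then (some w0, some (w0 * s), some (w0 * s + ws - 1)) else (none, none, none)) := by
  by_cases hg : w0 < 100 ∧ w0 * s ≤ diff ∧ diff ≤ w0 * s + ws - 1
  · rw [if_pos hg]
    obtain ⟨h100, hP⟩ := hg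
    have hsplit : PySem.List.pyRange 0 100 1 =
        PySem.List.pyRange 0 w0 1 ++ w0 :: PySem.List.pyRange (w0 + 1) 100 1 := by
      rw [PySem.List.pyRange_one_append 0 w0 100 hw0 (by omega),
          PySem.List.pyRange_one_cons h100]
    rw [hsplit]
    exact pvGoA_found diff ws s _ _ w0
      (fun x hx => by
        rw [PySem.List.mem_pyRange_one] at hx
        exact hbelow x hx.1 hx.2) hP
  · rw [if_neg hg]
    apply pvGoA_none
    intro w hwmem
    rw [PySem.List.mem_pyRange_one] at hwmem
    by_cases hlt : w < w0
    · exact hbelow w hwmem.1 hlt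
    · rcases Decidable.em (w0 * s ≤ diff ∧ diff ≤ w0 * s + ws - 1) with hP | hP
      · exact absurd ⟨by omega, hP⟩ hg
      · exact habove hP w (by omega)

theorem pvMain_eq (diff ws s : Int) (hs : 0 < s) :
    pvGoA diff ws s (PySem.List.pyRange 0 100 1) =
      (let w0 := max 0 (-(PySem.Int.floordiv (-(diff - ws + 1)) s))
       if w0 < 100 ∧ w0 * s ≤ diff ∧ diff ≤ w0 * s + ws - 1
       then (some w0, some (w0 * s), some (w0 * s + ws - 1)) else (none, none, none)) := by
  set c := -(PySem.Int.floordiv (-(diff - ws + 1)) s) with hc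
  have hspec : (c - 1) * s < diff - ws + 1 ∧ diff - ws + 1 ≤ c * s :=
    (PySem.Int.neg_floordiv_neg_eq_iff_of_pos hs).mp hc.symm
  apply pvMain diff ws s _ (le_max_left 0 c)
  · intro x hx0 hxlt
    have hxc : x < c := lt_of_lt_of_le hxlt (by
      rcases max_choice 0 c with h | h <;> omega)
    have : x * s ≤ (c - 1) * s := by
      apply mul_le_mul_of_nonneg_right (by omega) (by omega)
    intro ⟨_, hb⟩
    have := hspec.1
    omega
  · intro hP x hxge
    have hle : c * s ≤ (max 0 c) * s := by
      apply mul_le_mul_of_nonneg_right (le_max_right 0 c) (by omega)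
    have hsec : diff ≤ (max 0 c) * s + ws - 1 := by
      have := hspec.2; omega
    have hfirst : ¬ (max 0 c) * s ≤ diff := fun h => hP ⟨h, hsec⟩
    have hxle : (max 0 c) * s ≤ x * s :=
      mul_le_mul_of_nonneg_right hxge (by omega)
    intro ⟨ha, _⟩; omega

-- ===== VERDICT (by name: the statement is the Claim_ definition above) =====
theorem calculate_expected_window_spec : Claim_equal_calculate_expected_window := by
  intro rl ws s _ hs
  unfold Spec_calculate_expected_window calculate_expected_window calculate_expected_window_alt
  exact pvMain_eq (rl - 1) ws s hs
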